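-- pv_equiv track=rewrite | github.com/hunseok329/programmers | 탑.py | solution
-- ===== SOURCE A (Python) =====
-- def solution(heights):
--     length = len(heights)
--     result = [0]*length
--     reverse = heights[::-1]
--     for i in range(length):
--         for j in range(i+1, length):
--             if reverse[i] < reverse[j]:
--                 result[i] = length-j
--                 break
--     return result[::-1]
-- ===== SOURCE B (Python) =====
-- def solution(heights):
--     stack = []  # (index, height) pairs, heights strictly decreasing
--     res = []
--     for i, h in enumerate(heights):
--         while stack and stack[-1][1] <= h:
--             stack.pop()
--         res.append(stack[-1][0] + 1 if stack else 0)
--         stack.append((i, h))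
--     return res
-- ===== Notes on version B (the rewrite author's own statement) =====
-- stated objective: faster
-- what changed: Replaced the per-element backward scan over a reversed copy with a single left-to-right pass maintaining a monotonically decreasing stack of (index, height) pairs.
import Mathlib
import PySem

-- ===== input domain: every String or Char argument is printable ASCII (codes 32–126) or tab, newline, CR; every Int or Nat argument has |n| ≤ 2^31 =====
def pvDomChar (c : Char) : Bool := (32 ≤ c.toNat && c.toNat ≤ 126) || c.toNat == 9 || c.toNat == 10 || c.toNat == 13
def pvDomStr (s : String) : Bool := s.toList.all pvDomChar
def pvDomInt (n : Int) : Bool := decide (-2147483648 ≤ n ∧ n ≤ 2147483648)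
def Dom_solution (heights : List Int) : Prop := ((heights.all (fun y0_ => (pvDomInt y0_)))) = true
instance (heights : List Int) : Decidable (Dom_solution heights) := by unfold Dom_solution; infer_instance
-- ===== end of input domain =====

-- B replaces A's quadratic per-element backward scan with a single left-to-right
-- pass over a monotonically decreasing stack (objective: faster, asymptotic).


-- ===== PORT A =====
-- inner 'for j in range(i+1, length): if reverse[i] < reverse[j]: result[i] = length-j; break'
-- (returns the value written into result[i]; 0 if the loop ends without the break)
def aFindJ (rev : List Int) (len i j : Nat) : Int :=
  if _h : j < len then
    if rev.getD i 0 < rev.getD j 0 then (len : Int) - (j : Int)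
    else aFindJ rev len i (j + 1)
  else 0
termination_by len - j

def solution (heights : List Int) : List Int :=
  let length := heights.length
  let result : List Int := List.replicate length 0
  let rev := heights.reverse              -- heights[::-1]
  let result := (List.range length).foldl
    (fun res i => res.set i (aFindJ rev length i (i + 1))) result
  result.reverse                          -- result[::-1]

-- ===== PORT B =====
-- 'while stack and stack[-1][1] <= h: stack.pop()'  (stack top = list head)
def bPop (h : Int) : List (Nat × Int) → List (Nat × Int)
  | [] => []
  | (j, x) :: rest => if x ≤ h then bPop h rest else (j, x) :: rest

-- the 'for i, h in enumerate(heights)' loop; i = number of items already processed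
def bGo (i : Nat) (stack : List (Nat × Int)) : List Int → List Int
  | [] => []
  | h :: hs =>
    let s := bPop h stack
    (match s with
     | [] => 0
     | (j, _) :: _ => (j : Int) + 1) :: bGo (i + 1) ((i, h) :: s) hs

def solution_alt (heights : List Int) : List Int := bGo 0 [] heights

-- ===== PRECONDITION & SPEC =====
def Spec_solution (heights : List Int) (out : List Int) : Prop := out = solution_alt heights
instance (heights : List Int) (out : List Int) : Decidable (Spec_solution heights out) := by unfold Spec_solution; infer_instance

-- ===== CLAIM (what is proved, stated in full; the proofs are below) =====
def Claim_equal_solution : Prop := ∀ (heights : List Int), Dom_solution heights → Spec_solution heights (solution heights)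

-- ===== LEMMAS AND PROOFS =====

-- Middle spec: ntRev rp h = 1-based index of the nearest taller element in the
-- reversed prefix rp (head of rp = the element immediately to the left), 0 if none.
def ntRev (rp : List Int) (h : Int) : Int :=
  match rp with
  | [] => 0
  | x :: xs => if h < x then (xs.length : Int) + 1 else ntRev xs h

def specGo (rp : List Int) : List Int → List Int
  | [] => []
  | h :: hs => ntRev rp h :: specGo (h :: rp) hs

-- ntRev evaluated on a stack carrying explicit indices
def ntS (h : Int) : List (Nat × Int) → Int
  | [] => 0
  | (j, x) :: xs => if h < x then (j : Int) + 1 else ntS h xs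

-- ---- B side ----

theorem ntS_bPop_le (h h' : Int) (hle : h ≤ h') (s : List (Nat × Int)) :
    ntS h' (bPop h s) = ntS h' s := by
  induction s with
  | nil => rfl
  | cons p rest ih =>
    obtain ⟨j, x⟩ := p
    by_cases hx : x ≤ h
    · have : ¬ h' < x := not_lt.mpr (hx.trans hle)
      simp [bPop, hx, ntS, this, ih]
    · simp [bPop, hx]

theorem ntS_head (h : Int) (s : List (Nat × Int)) :
    ntS h s = (match bPop h s with
               | [] => (0 : Int)
               | (j, _) :: _ => (j : Int) + 1) := by
  induction s with
  | nil => rfl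
  | cons p rest ih =>
    obtain ⟨j, x⟩ := p
    by_cases hx : x ≤ h
    · simp [ntS, not_lt.mpr hx, bPop, hx, ih]
    · simp [ntS, not_le.mp hx, bPop, hx]

theorem bGo_eq_specGo (hs : List Int) :
    ∀ (i : Nat) (stack : List (Nat × Int)) (rp : List Int),
      rp.length = i →
      (∀ h', ntS h' stack = ntRev rp h') →
      bGo i stack hs = specGo rp hs := by
  induction hs with
  | nil => intro _ _ _ _ _; rfl
  | cons h hs ih =>
    intro i stack rp hlen hinv
    have hhead : (match bPop h stack with
                  | [] => (0 : Int)
                  | (j, _) :: _ => (j : Int) + 1) = ntRev rp h := by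
      rw [← ntS_head, hinv]
    have hrec : bGo (i + 1) ((i, h) :: bPop h stack) hs = specGo (h :: rp) hs := by
      apply ih
      · simp [hlen]
      · intro h'
        by_cases hlt : h' < h
        · simp [ntS, ntRev, hlt, hlen]
        · have : h ≤ h' := not_lt.mp hlt
          simp [ntS, ntRev, hlt, ntS_bPop_le h h' this, hinv]
    simp only [bGo, specGo, hhead, hrec]

theorem alt_eq_spec (heights : List Int) : solution_alt heights = specGo [] heights := by
  apply bGo_eq_specGo
  · rfl
  · intro h'; rfl

-- ---- A side ----

theorem aFindJ_eq_ntRev (rev : List Int) (len i : Nat) (hlen : len = rev.length) :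
    ∀ j, aFindJ rev len i j = ntRev (rev.drop j) (rev.getD i 0) := by
  subst hlen
  intro j
  induction hk : rev.length - j using Nat.strong_induction_on generalizing j with
  | _ k ihk =>
    by_cases hj : j < rev.length
    · have hd : rev.drop j = rev[j] :: rev.drop (j + 1) := List.drop_eq_getElem_cons hj
      have hgd : rev.getD j 0 = rev[j] := List.getD_eq_getElem rev 0 hj
      rw [aFindJ]
      simp only [hj, dite_true, hgd]
      rw [hd]
      simp only [ntRev, List.length_drop]
      by_cases hlt : rev.getD i 0 < rev[j]
      · rw [if_pos hlt, if_pos hlt]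
        omega
      · rw [if_neg hlt, if_neg hlt,
            ihk (rev.length - (j + 1)) (by omega) (j + 1) rfl]
    · rw [aFindJ]
      simp only [hj, dite_false]
      rw [List.drop_eq_nil_of_le (by omega)]
      rfl

theorem foldl_set_range (f : Nat → Int) (n : Nat) (res : List Int) (hn : n ≤ res.length) :
    (List.range n).foldl (fun r i => r.set i (f i)) res
      = (List.range n).map f ++ res.drop n := by
  induction n with
  | zero => simp
  | succ n ih =>
    rw [List.range_succ, List.foldl_append, ih (by omega)]
    simp only [List.foldl_cons, List.foldl_nil]
    rw [List.set_append_right _ _ (by simp)]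
    simp only [List.length_map, List.length_range, Nat.sub_self]
    have hdrop : res.drop n = res[n] :: res.drop (n + 1) :=
      List.drop_eq_getElem_cons (by omega)
    rw [hdrop, List.set_cons_zero]
    simp [List.map_append]

theorem specGo_eq_map (hs : List Int) :
    ∀ rp, specGo rp hs
      = (List.range hs.length).map
          (fun k => ntRev ((hs.take k).reverse ++ rp) (hs.getD k 0)) := by
  induction hs with
  | nil => intro rp; rfl
  | cons h hs ih =>
    intro rp
    simp only [specGo, List.length_cons, List.range_succ_eq_map, List.map_cons, List.map_map]
    congr 1
    rw [ih (h :: rp)]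
    apply List.map_congr_left
    intro k _
    simp [List.take_succ_cons]

theorem range_reverse_map (n : Nat) :
    (List.range n).reverse = (List.range n).map (fun k => n - 1 - k) := by
  apply List.ext_getElem
  · simp
  · intro k h1 h2
    simp only [List.length_reverse, List.length_range] at h1
    simp only [List.getElem_reverse, List.getElem_map, List.getElem_range, List.length_range]

theorem solution_eq_spec (heights : List Int) : solution heights = specGo [] heights := by
  have hstep : solution heights =
      ((List.range heights.length).map
        (fun i => aFindJ heights.reverse heights.length i (i + 1))).reverse := by
    show ((List.range heights.length).foldl
        (fun res i => res.set i (aFindJ heights.reverse heights.length i (i + 1)))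
        (List.replicate heights.length 0)).reverse = _
    rw [foldl_set_range (fun i => aFindJ heights.reverse heights.length i (i + 1))
        heights.length (List.replicate heights.length 0) (by simp)]
    rw [List.drop_eq_nil_of_le (by simp), List.append_nil]
  rw [hstep, specGo_eq_map, ← List.map_reverse, range_reverse_map, List.map_map]
  apply List.map_congr_left
  intro k hk
  simp only [List.mem_range] at hk
  simp only [Function.comp]
  rw [aFindJ_eq_ntRev heights.reverse heights.length _ (by simp) _]
  simp only [List.append_nil]
  congr 1
  · have hidx2 : heights.length - (heights.length - k) = k := by omega
    rw [(by omega : heights.length - 1 - k + 1 = heights.length - k), List.drop_reverse,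
        hidx2]
  · have hidx : heights.length - 1 - (heights.length - 1 - k) = k := by omega
    rw [List.getD_eq_getElem heights.reverse 0 (by simp; omega),
        List.getD_eq_getElem heights 0 (by omega : k < heights.length),
        List.getElem_reverse]
    simp only [hidx]

-- ===== VERDICT (by name: the statement is the Claim_ definition above) =====
theorem solution_spec : Claim_equal_solution := by
  intro heights _
  unfold Spec_solution
  rw [solution_eq_spec, alt_eq_spec]
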